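-- pv_equiv track=rewrite | github.com/salmamzfr/AGS_OPT_2D | Source/Helper_Funcs_2D.py | find_face_aligned_edges
-- ===== SOURCE A (Python) =====
-- def find_face_aligned_edges(ver_lis, corner_lis):
--     """
--     finds the aligned edges of a face, used in "update_dual_mapping_2"
--     ver_lis= vertice list of a face
--     corner_lis= vertex corners of a face
--     returns: face_edg_dic = {face_corner_edg : list of vertices on the long edge}
--     """
--     ind_mod=len(ver_lis)
--     face_edg_dic={}
--     # start from a corner and go forward to get to the next corner
--     for key in corner_lis:
--             align_ver_lis=[]
--             align_ver_lis.append(key)  # append the 1st corner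
--             cor_ind=ver_lis.index(key)
--             ind=1
--             while ver_lis[(cor_ind+ind)%ind_mod] not in corner_lis:
--                 align_ver_lis.append(ver_lis[(cor_ind+ind)%ind_mod])
--                 ind+=1
--             align_ver_lis.append(ver_lis[(cor_ind+ind)%ind_mod])  # append the 2nd corner
--             face_edg_dic[(align_ver_lis[0], align_ver_lis[-1])]=align_ver_lis
--
--     return face_edg_dic
-- ===== SOURCE B (Python) =====
-- def find_face_aligned_edges(ver_lis, corner_lis):
--     """Alternative: precompute the sorted cyclic cut positions (indices whose
--     vertex is a corner) once, then form each edge by a direct cyclic slice to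
--     the next cut -- no per-step membership scan inside a while loop."""
--     n = len(ver_lis)
--     corners = set(corner_lis)
--     cuts = [i for i, v in enumerate(ver_lis) if v in corners]
--     res = {}
--     for key in corner_lis:
--         p = ver_lis.index(key)  # raises ValueError on a missing corner, as the original does
--         q = next((c for c in cuts if c > p), cuts[0] + n)
--         res[(key, ver_lis[q % n])] = [ver_lis[(p + i) % n] for i in range(q - p + 1)]
--     return res
-- ===== Notes on version B (the rewrite author's own statement) =====
-- stated objective: alternative
-- what changed: A walks vertex-by-vertex from each corner with a per-step membership scan of corner_lis inside a modular while loop; B precomputes the sorted list of cut positions (indices whose vertex is a corner) once, picks each edge's endpoint as the next cut after the corner's position, and builds the edge by a direct cyclic slice.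
import Mathlib
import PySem

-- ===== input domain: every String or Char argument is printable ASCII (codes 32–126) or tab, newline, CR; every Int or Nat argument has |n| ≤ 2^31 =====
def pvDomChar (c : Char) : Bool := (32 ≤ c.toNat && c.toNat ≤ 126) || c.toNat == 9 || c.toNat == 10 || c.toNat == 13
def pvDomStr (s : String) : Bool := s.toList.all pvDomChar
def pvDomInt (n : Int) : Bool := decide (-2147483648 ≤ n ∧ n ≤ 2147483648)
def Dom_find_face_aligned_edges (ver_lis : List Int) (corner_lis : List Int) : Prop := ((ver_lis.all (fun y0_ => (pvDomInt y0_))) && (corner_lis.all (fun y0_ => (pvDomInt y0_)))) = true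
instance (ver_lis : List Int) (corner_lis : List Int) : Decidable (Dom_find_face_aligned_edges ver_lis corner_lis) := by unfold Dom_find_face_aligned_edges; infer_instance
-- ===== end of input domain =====

-- B replaces A's per-step membership scan in a modular while loop by precomputed
-- sorted cut positions and a direct cyclic slice to the next cut (objective: alternative).

-- ===== PORT A =====
-- the while loop of A: from offset ind, collect vertices until one lies in corner_lis
-- (that final corner is appended too). Fuel ver_lis.length always suffices: at
-- ind = length the scan is back at the starting corner, which is in corner_lis.
def pvWalkA (ver_lis corner_lis : List Int) (cor_ind : Nat) : Nat → Nat → List Int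
  | 0, _ => []
  | fuel + 1, ind =>
    let v := PySem.List.pyGetD ver_lis (((cor_ind + ind) % ver_lis.length : Nat) : Int) 0
    if v ∈ corner_lis then [v]
    else v :: pvWalkA ver_lis corner_lis cor_ind fuel (ind + 1)

def find_face_aligned_edges (ver_lis : List Int) (corner_lis : List Int) : List (Int × Int × List Int) :=
  (corner_lis.foldl (fun dic key =>
      -- ver_lis.index(key); raises ValueError when absent (excluded by Pre_), getD 0 is never used there
      let cor_ind := (PySem.List.index? ver_lis key).getD 0
      let edge := key :: pvWalkA ver_lis corner_lis cor_ind ver_lis.length 1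
      PySem.Dict.insert dic (key, PySem.List.pyGetD edge (-1) 0) edge)
    (PySem.Dict.empty : PySem.Dict (Int × Int) (List Int))).items.map (fun kv => (kv.1.1, kv.1.2, kv.2))

-- ===== PORT B =====
-- next((c for c in cuts if c > p), cuts[0] + n); cuts is nonempty whenever the loop
-- body runs under Pre_, headD 0 is the total form of cuts[0]
def pvNextCut (cuts : List Int) (p n : Int) : Int :=
  match cuts.find? (fun c => decide (p < c)) with
  | some q => q
  | none => cuts.headD 0 + n

def find_face_aligned_edges_alt (ver_lis : List Int) (corner_lis : List Int) : List (Int × Int × List Int) :=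
  let n : Int := ver_lis.length
  let corners := PySem.Set.ofList corner_lis
  let cuts := (PySem.List.enumerate ver_lis).filterMap
      (fun iv => if iv.2 ∈ corners then some iv.1 else none)
  (corner_lis.foldl (fun res key =>
      let p : Int := ((PySem.List.index? ver_lis key).getD 0 : Nat)
      let q := pvNextCut cuts p n
      let edge := (PySem.List.pyRange 0 (q - p + 1) 1).map
          (fun i => PySem.List.pyGetD ver_lis (PySem.Int.mod (p + i) n) 0)
      PySem.Dict.insert res (key, PySem.List.pyGetD ver_lis (PySem.Int.mod q n) 0) edge)
    (PySem.Dict.empty : PySem.Dict (Int × Int) (List Int))).items.map (fun kv => (kv.1.1, kv.1.2, kv.2))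

-- ===== PRECONDITION & SPEC =====
-- Pre_: every corner occurs among the face vertices; otherwise ver_lis.index(key)
-- raises ValueError in both A and B.
def Pre_find_face_aligned_edges (ver_lis : List Int) (corner_lis : List Int) : Prop :=
  ∀ c ∈ corner_lis, c ∈ ver_lis
instance (ver_lis : List Int) (corner_lis : List Int) : Decidable (Pre_find_face_aligned_edges ver_lis corner_lis) := by unfold Pre_find_face_aligned_edges; infer_instance

def pvWitness_find_face_aligned_edges : List Int × List Int := ([1, 5, 2, 7, 3, 9], [1, 7])

def Spec_find_face_aligned_edges (ver_lis : List Int) (corner_lis : List Int) (out : List (Int × Int × List Int)) : Prop := out = find_face_aligned_edges_alt ver_lis corner_lis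
instance (ver_lis : List Int) (corner_lis : List Int) (out : List (Int × Int × List Int)) : Decidable (Spec_find_face_aligned_edges ver_lis corner_lis out) := by unfold Spec_find_face_aligned_edges; infer_instance

-- ===== CLAIM (what is proved, stated in full; the proofs are below) =====
def Claim_equal_find_face_aligned_edges : Prop := ∀ (ver_lis : List Int) (corner_lis : List Int), Dom_find_face_aligned_edges ver_lis corner_lis → Pre_find_face_aligned_edges ver_lis corner_lis → Spec_find_face_aligned_edges ver_lis corner_lis (find_face_aligned_edges ver_lis corner_lis)

-- ===== LEMMAS AND PROOFS =====

-- the "next corner position" specification both ports compute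
def pvNextSpec (ver cor : List Int) (p q : Nat) : Prop :=
  p < q ∧ q ≤ p + ver.length ∧ ver.getD (q % ver.length) 0 ∈ cor ∧
    ∀ m, p < m → m < q → ver.getD (m % ver.length) 0 ∉ cor

-- the Nat-level cut list
def pvCutsN (ver cor : List Int) : List Nat :=
  (List.range ver.length).filter (fun i => decide (ver.getD i 0 ∈ cor))

lemma pvCutsN_mem (ver cor : List Int) (m : Nat) :
    m ∈ pvCutsN ver cor ↔ m < ver.length ∧ ver.getD m 0 ∈ cor := by
  simp [pvCutsN]

lemma pvCutsN_pairwise (ver cor : List Int) : (pvCutsN ver cor).Pairwise (· < ·) :=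
  List.Pairwise.sublist List.filter_sublist List.pairwise_lt_range

lemma pvFilterMap_ite {p : Nat → Prop} [DecidablePred p] (l : List Nat) :
    l.filterMap (fun k => if p k then some ((k : Nat) : Int) else none)
      = (l.filter (fun k => decide (p k))).map (fun k => ((k : Nat) : Int)) := by
  induction l with
  | nil => rfl
  | cons x t ih => by_cases h : p x <;> simp [h, ih]

lemma pvCuts_eq (ver cor : List Int) :
    (PySem.List.enumerate ver).filterMap
        (fun iv => if iv.2 ∈ PySem.Set.ofList cor then some iv.1 else none)
      = (pvCutsN ver cor).map (fun k => ((k : Nat) : Int)) := by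
  rw [PySem.List.enumerate_eq_map_pyRange (d := 0), List.filterMap_map,
    PySem.List.pyRange_one, List.filterMap_map]
  simp only [Function.comp_def, zero_add, Int.sub_zero,
    PySem.List.pyGetD_natCast, PySem.Set.mem_ofList]
  exact pvFilterMap_ite _

lemma pvFind_lt_some (l : List Int) (p q : Int) (hl : l.Pairwise (· < ·))
    (h : l.find? (fun c => decide (p < c)) = some q) :
    q ∈ l ∧ p < q ∧ ∀ c ∈ l, p < c → q ≤ c := by
  induction l with
  | nil => simp at h
  | cons x t ih =>
    rw [List.find?_cons] at h
    by_cases hx : p < x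
    · simp [hx] at h
      subst h
      refine ⟨by simp, hx, ?_⟩
      intro c hc _
      rcases List.mem_cons.mp hc with rfl | hct
      · exact le_refl _
      · exact le_of_lt (List.rel_of_pairwise_cons hl hct)
    · simp [hx] at h
      obtain ⟨hq, hpq, hmin⟩ := ih (List.Pairwise.of_cons hl) h
      exact ⟨by simp [hq], hpq, fun c hc hpc => by
        rcases List.mem_cons.mp hc with rfl | hct
        · exact absurd hpc hx
        · exact hmin c hct hpc⟩

lemma pvNextCut_spec (ver cor : List Int) (p : Nat) (hp : p < ver.length)
    (hpc : ver.getD p 0 ∈ cor) :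
    ∃ qn : Nat, pvNextCut ((pvCutsN ver cor).map (fun k => ((k : Nat) : Int))) p ver.length
        = (qn : Int) ∧ pvNextSpec ver cor p qn := by
  have hn : 0 < ver.length := Nat.lt_of_le_of_lt (Nat.zero_le _) hp
  have hpcuts : p ∈ pvCutsN ver cor := (pvCutsN_mem ver cor p).mpr ⟨hp, hpc⟩
  have hpair : ((pvCutsN ver cor).map (fun k => ((k : Nat) : Int))).Pairwise (· < ·) := by
    rw [List.pairwise_map]
    exact (pvCutsN_pairwise ver cor).imp (fun h => by exact_mod_cast h)
  unfold pvNextCut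
  cases hfind : ((pvCutsN ver cor).map (fun k => ((k : Nat) : Int))).find?
      (fun c => decide ((p : Int) < c)) with
  | some q =>
    obtain ⟨hqmem, hpq, hmin⟩ := pvFind_lt_some _ _ _ hpair hfind
    obtain ⟨m, hmcuts, hmq⟩ := List.mem_map.mp hqmem
    obtain ⟨hmn, hmcor⟩ := (pvCutsN_mem ver cor m).mp hmcuts
    subst hmq
    refine ⟨m, rfl, (by exact_mod_cast hpq), Nat.le_trans (Nat.le_of_lt hmn) (Nat.le_add_left _ _),
      by rwa [Nat.mod_eq_of_lt hmn], ?_⟩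
    intro m' hpm' hm'm hm'cor
    have hm'n : m' < ver.length := Nat.lt_trans hm'm hmn
    rw [Nat.mod_eq_of_lt hm'n] at hm'cor
    have : ((m' : Nat) : Int) ∈ (pvCutsN ver cor).map (fun k => ((k : Nat) : Int)) :=
      List.mem_map.mpr ⟨m', (pvCutsN_mem ver cor m').mpr ⟨hm'n, hm'cor⟩, rfl⟩
    have := hmin _ this (by exact_mod_cast hpm')
    omega
  | none =>
    have hnone := List.find?_eq_none.mp hfind
    cases hc : pvCutsN ver cor with
    | nil => rw [hc] at hpcuts; simp at hpcuts
    | cons c0 rest =>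
      have hc0min : ∀ m ∈ pvCutsN ver cor, c0 ≤ m := by
        rw [hc]
        intro m hm
        rcases List.mem_cons.mp hm with rfl | hmr
        · exact le_refl _
        · exact Nat.le_of_lt (List.rel_of_pairwise_cons (hc ▸ pvCutsN_pairwise ver cor) hmr)
      obtain ⟨hc0n, hc0cor⟩ := (pvCutsN_mem ver cor c0).mp (hc ▸ List.mem_cons_self)
      have hc0p : c0 ≤ p := by
        have := hnone ((c0 : Int)) (by rw [hc]; simp)
        simpa using this
      refine ⟨c0 + ver.length, by simp, ?_, by omega, ?_, ?_⟩
      · omega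
      · rw [Nat.add_mod_right, Nat.mod_eq_of_lt hc0n]; exact hc0cor
      · intro m hpm hmub hmcor
        have hmodn : m % ver.length < ver.length := Nat.mod_lt _ hn
        have hmodcuts : m % ver.length ∈ pvCutsN ver cor :=
          (pvCutsN_mem ver cor _).mpr ⟨hmodn, hmcor⟩
        by_cases hmn : m < ver.length
        · rw [Nat.mod_eq_of_lt hmn] at hmodcuts
          have := hnone ((m : Nat) : Int) (List.mem_map.mpr ⟨m, hmodcuts, rfl⟩)
          simp at this
          omega
        · have hm2 : m % ver.length = m - ver.length := by
            rw [Nat.mod_eq_sub_mod (by omega), Nat.mod_eq_of_lt (by omega)]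
          rw [hm2] at hmodcuts
          have := hc0min _ hmodcuts
          omega

lemma pvMapRangeCons {α : Type} (g : Nat → α) (k : Nat) :
    (List.range (k + 1)).map g = g 0 :: (List.range k).map (fun i => g (i + 1)) := by
  rw [List.range_succ_eq_map, List.map_cons, List.map_map]
  rfl

lemma pvWalkA_eq (ver cor : List Int) (p q : Nat) (hs : pvNextSpec ver cor p q) :
    ∀ fuel ind, 1 ≤ ind → ind ≤ q - p → q < p + ind + fuel →
      pvWalkA ver cor p fuel ind
        = (List.range (q - p - ind + 1)).map (fun i => ver.getD ((p + ind + i) % ver.length) 0) := by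
  obtain ⟨hpq, hqn, hqcor, hmin⟩ := hs
  intro fuel
  induction fuel with
  | zero => intro ind h1 h2 h3; omega
  | succ fuel ih =>
    intro ind h1 h2 h3
    unfold pvWalkA
    simp only [PySem.List.pyGetD_natCast]
    by_cases hend : ind = q - p
    · have hpq' : p + ind = q := by omega
      rw [if_pos (by rw [hpq']; exact hqcor)]
      have : q - p - ind + 1 = 1 := by omega
      rw [this]
      simp [hpq']
    · have hlt : p + ind < q := by omega
      rw [if_neg (hmin (p + ind) (by omega) hlt)]
      rw [ih (ind + 1) (by omega) (by omega) (by omega)]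
      have hk : q - p - ind + 1 = (q - p - (ind + 1) + 1) + 1 := by omega
      conv_rhs => rw [hk, pvMapRangeCons]
      refine List.cons_eq_cons.mpr ⟨by rw [Nat.add_zero], List.map_congr_left ?_⟩
      intro i _
      have h4 : p + (ind + 1) + i = p + ind + (i + 1) := by omega
      rw [h4]

-- the two per-key dict updates coincide when key ∈ ver_lis
lemma pvStep_eq (ver cor : List Int) (key : Int) (hk : key ∈ ver) (hc : key ∈ cor)
    (dic : PySem.Dict (Int × Int) (List Int)) :
    (let cor_ind := (PySem.List.index? ver key).getD 0
     let edge := key :: pvWalkA ver cor cor_ind ver.length 1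
     PySem.Dict.insert dic (key, PySem.List.pyGetD edge (-1) 0) edge)
    = (let p : Int := ((PySem.List.index? ver key).getD 0 : Nat)
       let q := pvNextCut ((pvCutsN ver cor).map (fun k => ((k : Nat) : Int))) p ver.length
       let edge := (PySem.List.pyRange 0 (q - p + 1) 1).map
           (fun i => PySem.List.pyGetD ver (PySem.Int.mod (p + i) ver.length) 0)
       PySem.Dict.insert dic (key, PySem.List.pyGetD ver (PySem.Int.mod q ver.length) 0) edge) := by
  obtain ⟨k, hidx⟩ := Option.isSome_iff_exists.mp ((PySem.List.index?_isSome_iff ver key).mpr hk)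
  obtain ⟨hklen, hkget, -⟩ := PySem.List.getElem_of_index?_eq_some hidx
  have hgetD : ver.getD k 0 = key := by rw [List.getD_eq_getElem ver 0 hklen]; exact hkget
  have hnz : (0 : Int) < (ver.length : Int) := by exact_mod_cast Nat.lt_of_le_of_lt (Nat.zero_le _) hklen
  simp only [hidx, Option.getD_some]
  obtain ⟨qn, hq, hspec⟩ := pvNextCut_spec ver cor k hklen (by rw [hgetD]; exact hc)
  rw [hq]
  obtain ⟨hkq, hqub, hqcor, hqmin⟩ := hspec
  -- B's cyclic slice, in Nat form
  have hform : (PySem.List.pyRange 0 ((qn : Int) - (k : Int) + 1) 1).map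
        (fun i => PySem.List.pyGetD ver (PySem.Int.mod ((k : Int) + i) (ver.length : Int)) 0)
      = (List.range (qn - k + 1)).map (fun j => ver.getD ((k + j) % ver.length) 0) := by
    have h1 : ((qn : Int) - (k : Int) + 1) = ((qn - k + 1 : Nat) : Int) := by push_cast; omega
    rw [h1, PySem.List.pyRange_one, List.map_map]
    apply List.map_congr_left
    intro j _
    simp only [Function.comp_apply]
    rw [PySem.Int.mod_eq_emod_of_pos hnz]
    have h2 : (0 : Int) + (j : Int) = (j : Int) := by ring
    rw [h2]
    have h3 : ((k : Int) + (j : Int)) % (ver.length : Int) = (((k + j) % ver.length : Nat) : Int) := by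
      push_cast; ring_nf
    rw [h3, PySem.List.pyGetD_natCast]
  -- B's slice equals A's edge
  have hedge : (PySem.List.pyRange 0 ((qn : Int) - (k : Int) + 1) 1).map
        (fun i => PySem.List.pyGetD ver (PySem.Int.mod ((k : Int) + i) (ver.length : Int)) 0)
      = key :: pvWalkA ver cor k ver.length 1 := by
    rw [hform, pvWalkA_eq ver cor k qn ⟨hkq, hqub, hqcor, hqmin⟩ ver.length 1 (le_refl 1)
      (by omega) (by omega)]
    have h4 : qn - k + 1 = (qn - k - 1 + 1) + 1 := by omega
    conv_lhs => rw [h4, pvMapRangeCons]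
    refine List.cons_eq_cons.mpr ⟨?_, List.map_congr_left ?_⟩
    · rw [Nat.add_zero, Nat.mod_eq_of_lt hklen]; exact hgetD
    · intro i _
      have h5 : k + (i + 1) = k + 1 + i := by omega
      rw [h5]
  -- the dict keys agree: last vertex of the edge is ver[qn % n]
  have hkey : PySem.List.pyGetD (key :: pvWalkA ver cor k ver.length 1) (-1) 0
      = PySem.List.pyGetD ver (PySem.Int.mod (qn : Int) (ver.length : Int)) 0 := by
    rw [← hedge, hform]
    have h6 : qn - k + 1 = (qn - k) + 1 := rfl
    rw [h6, List.range_succ, List.map_append, List.map_cons, List.map_nil,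
      PySem.List.pyGetD_neg_one_append_singleton]
    rw [PySem.Int.mod_eq_emod_of_pos hnz]
    have h7 : ((qn : Int)) % (ver.length : Int) = ((qn % ver.length : Nat) : Int) := by
      push_cast; ring_nf
    rw [h7, PySem.List.pyGetD_natCast]
    have h8 : k + (qn - k) = qn := by omega
    rw [h8]
  rw [hkey, hedge]

lemma pvFold_eq (ver cor : List Int) (l : List Int) (hl : ∀ c ∈ l, c ∈ ver) (hc : ∀ c ∈ l, c ∈ cor)
    (dic : PySem.Dict (Int × Int) (List Int)) :
    l.foldl (fun dic key =>
      let cor_ind := (PySem.List.index? ver key).getD 0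
      let edge := key :: pvWalkA ver cor cor_ind ver.length 1
      PySem.Dict.insert dic (key, PySem.List.pyGetD edge (-1) 0) edge) dic
    = l.foldl (fun res key =>
      let p : Int := ((PySem.List.index? ver key).getD 0 : Nat)
      let q := pvNextCut ((pvCutsN ver cor).map (fun k => ((k : Nat) : Int))) p ver.length
      let edge := (PySem.List.pyRange 0 (q - p + 1) 1).map
          (fun i => PySem.List.pyGetD ver (PySem.Int.mod (p + i) ver.length) 0)
      PySem.Dict.insert res (key, PySem.List.pyGetD ver (PySem.Int.mod q ver.length) 0) edge) dic := by
  induction l generalizing dic with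
  | nil => rfl
  | cons x t ih =>
    simp only [List.foldl_cons]
    rw [pvStep_eq ver cor x (hl x (by simp)) (hc x (by simp)) dic]
    exact ih (fun c h => hl c (by simp [h])) (fun c h => hc c (by simp [h])) _

-- ===== VERDICT (by name: the statement is the Claim_ definition above) =====
theorem find_face_aligned_edges_spec : Claim_equal_find_face_aligned_edges := by
  intro ver cor _hdom hpre
  unfold Spec_find_face_aligned_edges find_face_aligned_edges find_face_aligned_edges_alt
  simp only [pvCuts_eq]
  rw [pvFold_eq ver cor cor hpre (fun c h => h)]
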